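-- pv_equiv track=rewrite | github.com/remusezequiel/Lic.-Ciencia-de-Datos | Algoritmos_Y_Estructuras_De_Datos/aed_1/Practica/CodigoGuiasPython/EjerciciosParcial/solucion.py | cuantos_sufijos_son_palindromos
-- ===== SOURCE A (Python) =====
-- def palindromo(texto:str)->bool:
--     for i in range(len(texto)//2):
--         if (texto[i]!=texto[len(texto)-i-1]):
--             return False
--     return True
--
-- def cuantos_sufijos_son_palindromos(texto:str)->int:
--     candidato:str = ''
--     res:int = 0
--     for i in range(len(texto)-1,-1,-1):
--         candidato = texto[i] + candidato
--         if (palindromo(candidato)):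
--             res += 1
--     return res
-- ===== SOURCE B (Python) =====
-- def cuantos_sufijos_son_palindromos(texto: str) -> int:
--     n = len(texto)
--     rev = texto[::-1]
--     return sum(1 for i in range(n) if texto[i:] == rev[:n - i])
-- ===== Notes on version B (the rewrite author's own statement) =====
-- stated objective: simpler
-- what changed: replaces the incremental candidate string build plus a hand-written two-index palindrome scan with one precomputed reversal and a direct slice-equality test per suffix
import Mathlib
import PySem

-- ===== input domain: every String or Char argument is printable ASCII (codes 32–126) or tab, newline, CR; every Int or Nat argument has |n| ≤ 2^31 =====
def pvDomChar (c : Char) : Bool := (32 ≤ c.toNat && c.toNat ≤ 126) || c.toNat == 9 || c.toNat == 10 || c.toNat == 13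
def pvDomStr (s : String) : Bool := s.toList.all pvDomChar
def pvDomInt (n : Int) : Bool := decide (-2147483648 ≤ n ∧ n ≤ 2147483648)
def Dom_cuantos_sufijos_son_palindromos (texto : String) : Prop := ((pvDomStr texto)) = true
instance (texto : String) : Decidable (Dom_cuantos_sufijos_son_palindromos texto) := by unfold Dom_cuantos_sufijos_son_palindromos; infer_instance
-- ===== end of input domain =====

-- B replaces A's incremental candidate build plus hand-written two-index palindrome scan
-- with one precomputed reversal and a direct slice-equality test per suffix (objective: simpler).


-- ===== PORT A =====
-- helper 'palindromo': for i in range(len(texto)//2): if texto[i] != texto[len-i-1]: return False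
-- (both indices are provably in range inside the loop, so List.getD is exact here)
def palindromoGo (cs : List Char) (n : Nat) (i : Nat) : Bool :=
  if i < n / 2 then
    if cs.getD i ' ' ≠ cs.getD (n - i - 1) ' ' then false
    else palindromoGo cs n (i + 1)
  else true
termination_by n / 2 - i

def palindromo (cs : List Char) : Bool := palindromoGo cs cs.length 0

-- the for-loop over range(len(texto)-1, -1, -1), carrying candidato and res
def aGo (cs : List Char) : List Int → List Char → Int → Int
  | [], _, res => res
  | i :: rest, cand, res =>
    let cand' := PySem.List.pyGetD cs i ' ' :: cand   -- candidato = texto[i] + candidato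
    aGo cs rest cand' (if palindromo cand' then res + 1 else res)

def cuantos_sufijos_son_palindromos (texto : String) : Int :=
  let cs := texto.toList
  aGo cs (PySem.List.pyRange ((cs.length : Int) - 1) (-1) (-1)) [] 0

-- ===== PORT B =====
-- rev = texto[::-1] is the reversal (PySem.List.slice?_none_none_neg_one);
-- sum(1 for i in range(n) if texto[i:] == rev[:n-i]) is the conditional-count fold below
def cuantos_sufijos_son_palindromos_alt (texto : String) : Int :=
  let cs := texto.toList
  let n := cs.length
  let rev := cs.reverse
  (PySem.List.pyRange 0 (n : Int) 1).foldl
    (fun acc i =>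
      if PySem.List.slice cs (some i) none = PySem.List.slice rev none (some ((n : Int) - i))
      then acc + 1 else acc) 0

-- ===== PRECONDITION & SPEC =====
def Spec_cuantos_sufijos_son_palindromos (texto : String) (out : Int) : Prop := out = cuantos_sufijos_son_palindromos_alt texto
instance (texto : String) (out : Int) : Decidable (Spec_cuantos_sufijos_son_palindromos texto out) := by unfold Spec_cuantos_sufijos_son_palindromos; infer_instance

-- ===== CLAIM (what is proved, stated in full; the proofs are below) =====
def Claim_equal_cuantos_sufijos_son_palindromos : Prop := ∀ (texto : String), Dom_cuantos_sufijos_son_palindromos texto → Spec_cuantos_sufijos_son_palindromos texto (cuantos_sufijos_son_palindromos texto)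

-- ===== LEMMAS AND PROOFS =====

-- palindromoGo checks exactly the pairs (i, n-i-1) for j ≤ i < n/2
theorem palindromoGo_iff (cs : List Char) (n j : Nat) :
    palindromoGo cs n j = true ↔
      ∀ i, j ≤ i → i < n / 2 → cs.getD i ' ' = cs.getD (n - i - 1) ' ' := by
  by_cases h : j < n / 2
  · rw [palindromoGo]
    simp only [h, if_true, ne_eq, ite_not]
    by_cases he : cs.getD j ' ' = cs.getD (n - j - 1) ' '
    · simp only [he, if_true]
      rw [palindromoGo_iff cs n (j + 1)]
      constructor
      · intro H i hji hi
        rcases Nat.eq_or_lt_of_le hji with rfl | hlt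
        · exact he
        · exact H i hlt hi
      · intro H i hji hi
        exact H i (Nat.le_of_succ_le hji) hi
    · simp only [he, if_false]
      constructor
      · intro H; exact absurd H (by simp)
      · intro H; exact absurd (H j le_rfl h) he
  · rw [palindromoGo]
    simp only [h, if_false, true_iff]
    intro i hji hi
    omega
termination_by n / 2 - j

-- reversal read through getD (non-dependent form of getElem_reverse)
theorem getD_reverse (cs : List Char) (a : Nat) (ha : a < cs.length) :
    cs.reverse.getD a ' ' = cs.getD (cs.length - 1 - a) ' ' := by
  rw [List.getD_eq_getElem cs.reverse ' ' (by simpa using ha),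
      List.getD_eq_getElem cs ' ' (by omega), List.getElem_reverse]

-- half-scan condition ⇔ the list equals its reverse
theorem half_iff_reverse (cs : List Char) :
    (∀ i, i < cs.length / 2 →
        cs.getD i ' ' = cs.getD (cs.length - i - 1) ' ') ↔ cs.reverse = cs := by
  constructor
  · intro H
    apply List.ext_getElem (by simp)
    intro i h1 h2
    have e1 : cs.reverse.getD i ' ' = cs.reverse[i] := List.getD_eq_getElem cs.reverse ' ' h1
    have e2 : cs.getD i ' ' = cs[i] := List.getD_eq_getElem cs ' ' h2
    rw [← e1, ← e2, getD_reverse cs i h2]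
    by_cases hc : i < cs.length / 2
    · rw [show cs.length - 1 - i = cs.length - i - 1 from by omega]
      exact (H i hc).symm
    · by_cases hm : cs.length - 1 - i = i
      · rw [hm]
      · have hj : cs.length - 1 - i < cs.length / 2 := by omega
        have h5 := H (cs.length - 1 - i) hj
        rw [show cs.length - (cs.length - 1 - i) - 1 = i from by omega] at h5
        exact h5
  · intro H i hi
    have h2 : i < cs.length := by omega
    have h6 : cs.reverse.getD i ' ' = cs.getD i ' ' := by rw [H]
    rw [getD_reverse cs i h2] at h6
    rw [← h6]
    congr 1
    omega

theorem palindromo_iff (cs : List Char) : palindromo cs = true ↔ cs.reverse = cs := by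
  unfold palindromo
  rw [palindromoGo_iff]
  rw [← half_iff_reverse]
  constructor
  · intro H i hi; exact H i (Nat.zero_le i) hi
  · intro H i _ hi; exact H i hi

-- A's loop counts the palindromic suffixes of cs among drop (k-1), …, drop 0
theorem aGo_count (cs : List Char) :
    ∀ (k : Nat), k ≤ cs.length → ∀ (res : Int),
      aGo cs (PySem.List.pyRange ((k : Int) - 1) (-1) (-1)) (cs.drop k) res =
        res + ((List.range k).countP (fun i => palindromo (cs.drop i))) := by
  intro k
  induction k with
  | zero =>
    intro _ res
    rw [PySem.List.pyRange_neg_one_eq_nil (by norm_num)]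
    simp [aGo]
  | succ k ih =>
    intro hk res
    have hcons : PySem.List.pyRange (((k : Nat) + 1 : Int) - 1) (-1) (-1) =
        (k : Int) :: PySem.List.pyRange ((k : Int) - 1) (-1) (-1) := by
      have h7 := PySem.List.pyRange_neg_one_cons (a := ((k : Nat) + 1 : Int) - 1) (b := -1)
        (by omega)
      simpa using h7
    push_cast
    rw [hcons]
    show aGo cs _ _ _ = _
    rw [aGo]
    have hklt : k < cs.length := by omega
    have hget : PySem.List.pyGetD cs (k : Int) ' ' = cs.getD k ' ' := by
      rw [PySem.List.pyGetD_of_nonneg cs ' ' (Int.natCast_nonneg k)]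
      rw [Int.toNat_natCast]
    have hdrop : PySem.List.pyGetD cs (k : Int) ' ' :: cs.drop (k + 1) = cs.drop k := by
      rw [hget, List.getD_eq_getElem cs ' ' hklt]
      exact List.getElem_cons_drop hklt
    simp only [hdrop]
    rw [ih (by omega)]
    rw [List.range_succ, List.countP_append]
    by_cases hp : palindromo (cs.drop k) = true
    · simp only [hp, if_true, List.countP_cons, List.countP_nil]
      push_cast
      ring
    · simp only [Bool.of_not_eq_true hp, List.countP_cons, List.countP_nil]
      push_cast
      ring

-- B's conditional-count fold, specialised to its test
theorem foldl_slice_count (cs : List Char) (n : Nat) :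
    ∀ (l : List Int) (acc : Int),
      l.foldl (fun acc i =>
          if PySem.List.slice cs (some i) none =
              PySem.List.slice cs.reverse none (some ((n : Int) - i))
          then acc + 1 else acc) acc =
        acc + (l.countP (fun i =>
          decide (PySem.List.slice cs (some i) none =
            PySem.List.slice cs.reverse none (some ((n : Int) - i)))) : Int) := by
  intro l
  induction l with
  | nil => intro acc; simp
  | cons x xs ih =>
    intro acc
    simp only [List.foldl_cons, List.countP_cons, ih]
    by_cases hx : PySem.List.slice cs (some x) none =
        PySem.List.slice cs.reverse none (some ((n : Int) - x))
    · simp only [hx, if_true, decide_true]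
      push_cast
      ring
    · simp only [hx, if_false, decide_false]
      push_cast
      ring

-- the two predicates agree on every i < n
theorem pred_agree (cs : List Char) (i : Nat) (hi : i < cs.length) :
    palindromo (cs.drop i) =
      decide (PySem.List.slice cs (some (i : Int)) none =
        PySem.List.slice cs.reverse none (some ((cs.length : Int) - (i : Int)))) := by
  have h1 : PySem.List.slice cs (some (i : Int)) none = cs.drop i :=
    PySem.List.slice_from_natCast cs i
  have h2 : ((cs.length : Int) - (i : Int)) = ((cs.length - i : Nat) : Int) := by omega
  have h3 : PySem.List.slice cs.reverse none (some ((cs.length : Int) - (i : Int))) =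
      cs.reverse.take (cs.length - i) := by
    rw [h2]; exact PySem.List.slice_to_natCast cs.reverse (cs.length - i)
  have h4 : cs.reverse.take (cs.length - i) = (cs.drop i).reverse :=
    List.reverse_drop.symm
  rw [h1, h3, h4]
  cases hp : palindromo (cs.drop i) with
  | true =>
    have hr := (palindromo_iff (cs.drop i)).mp hp
    symm
    rw [decide_eq_true_eq]
    exact hr.symm
  | false =>
    symm
    simp only [decide_eq_false_iff_not]
    intro h
    have := (palindromo_iff (cs.drop i)).mpr h.symm
    rw [hp] at this
    exact Bool.false_ne_true this

-- ===== VERDICT (by name: the statement is the Claim_ definition above) =====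
theorem cuantos_sufijos_son_palindromos_spec : Claim_equal_cuantos_sufijos_son_palindromos := by
  intro texto _
  unfold Spec_cuantos_sufijos_son_palindromos
  unfold cuantos_sufijos_son_palindromos cuantos_sufijos_son_palindromos_alt
  show aGo texto.toList
      (PySem.List.pyRange ((texto.toList.length : Int) - 1) (-1) (-1)) [] 0 =
    (PySem.List.pyRange 0 (texto.toList.length : Int) 1).foldl
      (fun acc i =>
        if PySem.List.slice texto.toList (some i) none =
            PySem.List.slice texto.toList.reverse none
              (some ((texto.toList.length : Int) - i))
        then acc + 1 else acc) 0
  have hA := aGo_count texto.toList texto.toList.length le_rfl 0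
  rw [List.drop_length] at hA
  rw [hA, foldl_slice_count, zero_add, zero_add]
  congr 1
  rw [PySem.List.pyRange_one]
  simp only [sub_zero, Int.toNat_natCast, zero_add]
  rw [List.countP_map]
  apply List.countP_congr
  intro i hi
  simp only [List.mem_range] at hi
  simp only [Function.comp]
  rw [pred_agree texto.toList i hi]
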